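-- pv_equiv track=rewrite | github.com/nanisaladi24/Leetcode_py_codes | Easy/flipImg.py | revFlip
-- ===== SOURCE A (Python) =====
-- def revFlip(s):
--     #s.reverse()
--     #print s
--     t=len(s)
--     for i in range(int(t/2)):
--
--         j=t-1-i
--
--         l=s[i]
--         r=s[j]
--
--         if l:
--             l=0
--         else:
--             l=1
--
--         if r:
--             r=0
--         else:
--             r=1
--
--         s[i]=r
--         s[j]=l
--
--     if t%2==1:
--         j=int(t/2)
--         if s[j]:
--             s[j]=0
--         else:
--             s[j]=1
--
--     return s
-- ===== SOURCE B (Python) =====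
-- def revFlip(s):
--     s[:] = [0 if x else 1 for x in reversed(s)]
--     return s
-- ===== Notes on version B (the rewrite author's own statement) =====
-- stated objective: simpler
-- what changed: Replaces the two-pointer in-place swap loop with a midpoint special case by a single comprehension that rebuilds the list as the truthiness-flip of its reverse.
import Mathlib
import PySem

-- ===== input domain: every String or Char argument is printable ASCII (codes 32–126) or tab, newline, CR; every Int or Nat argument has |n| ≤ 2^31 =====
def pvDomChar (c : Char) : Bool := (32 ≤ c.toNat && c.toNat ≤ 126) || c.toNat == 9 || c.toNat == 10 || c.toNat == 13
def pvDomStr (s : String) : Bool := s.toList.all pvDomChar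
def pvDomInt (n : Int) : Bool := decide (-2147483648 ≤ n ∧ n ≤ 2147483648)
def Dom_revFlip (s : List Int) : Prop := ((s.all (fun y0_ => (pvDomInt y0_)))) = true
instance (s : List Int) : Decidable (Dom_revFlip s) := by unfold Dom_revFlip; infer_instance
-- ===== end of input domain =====

-- B replaces A's two-pointer swap loop and odd-midpoint branch by one pass: flip of the reverse (simpler).
-- Equivalence is about the return value; both Pythons also mutate s in place to the same final contents.


-- ===== PORT A =====
def revFlip (s : List Int) : List Int :=
  let t : Int := s.length
  let s1 := (PySem.List.pyRange 0 (PySem.Int.floordiv t 2) 1).foldl (fun u i =>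
      let j := t - 1 - i
      let l := PySem.List.pyGetD u i 0
      let r := PySem.List.pyGetD u j 0
      let l' : Int := if l ≠ 0 then 0 else 1
      let r' : Int := if r ≠ 0 then 0 else 1
      PySem.List.pySetD (PySem.List.pySetD u i r') j l') s
  if PySem.Int.mod t 2 = 1 then
    let j := PySem.Int.floordiv t 2
    let m := PySem.List.pyGetD s1 j 0
    PySem.List.pySetD s1 j (if m ≠ 0 then 0 else 1)
  else s1

-- ===== PORT B =====
def revFlip_alt (s : List Int) : List Int :=
  s.reverse.map (fun x => if x ≠ 0 then 0 else 1)

-- ===== PRECONDITION & SPEC =====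
def Spec_revFlip (s : List Int) (out : List Int) : Prop := out = revFlip_alt s
instance (s : List Int) (out : List Int) : Decidable (Spec_revFlip s out) := by unfold Spec_revFlip; infer_instance

-- ===== CLAIM (what is proved, stated in full; the proofs are below) =====
def Claim_equal_revFlip : Prop := ∀ (s : List Int), Dom_revFlip s → Spec_revFlip s (revFlip s)

-- ===== LEMMAS AND PROOFS =====

-- the truthiness flip both programs apply to each element
def pvFlip (x : Int) : Int := if x ≠ 0 then 0 else 1

-- A's loop body, named for the proofs (identical to the lambda in the port)
def pvStep (t : Int) (u : List Int) (i : Int) : List Int :=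
  let j := t - 1 - i
  let l := PySem.List.pyGetD u i 0
  let r := PySem.List.pyGetD u j 0
  let l' : Int := if l ≠ 0 then 0 else 1
  let r' : Int := if r ≠ 0 then 0 else 1
  PySem.List.pySetD (PySem.List.pySetD u i r') j l'

lemma getD_of_some {l : List Int} {p : Nat} {a : Int} (h : l[p]? = some a) :
    l.getD p 0 = a := by
  simp [List.getD_eq_getElem?_getD, h]

-- invariant of A's two-pointer loop after k iterations: the outer k positions on each
-- side hold the flipped mirror element, the middle is still untouched
lemma pvLoop_inv (s : List Int) (k : Nat) (hk : 2 * k ≤ s.length) :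
    ((PySem.List.pyRange 0 (k : Int) 1).foldl (pvStep (s.length : Int)) s).length = s.length ∧
    ∀ p : Nat, p < s.length →
      ((PySem.List.pyRange 0 (k : Int) 1).foldl (pvStep (s.length : Int)) s)[p]? =
        some (if p < k ∨ s.length - k ≤ p then pvFlip (s.getD (s.length - 1 - p) 0)
              else s.getD p 0) := by
  induction k with
  | zero =>
    rw [PySem.List.pyRange_one_eq_nil (by omega)]
    simp only [List.foldl_nil]
    refine ⟨by trivial, fun p hp => ?_⟩
    rw [if_neg (by omega), List.getElem?_eq_getElem hp]
    simp [List.getD_eq_getElem?_getD, List.getElem?_eq_getElem hp]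
  | succ k ih =>
    obtain ⟨hlen, hget⟩ := ih (by omega)
    have hcast : ((k + 1 : Nat) : Int) = (k : Int) + 1 := by omega
    rw [hcast, PySem.List.pyRange_one_succ_right (by omega), List.foldl_append]
    set u := (PySem.List.pyRange 0 (k : Int) 1).foldl (pvStep (s.length : Int)) s with hu
    simp only [List.foldl_cons, List.foldl_nil]
    have hklt : k < s.length := by omega
    have hjlt : s.length - 1 - k < s.length := by omega
    have hjcast : ((s.length : Int) - 1 - (k : Int)) = ((s.length - 1 - k : Nat) : Int) := by
      omega
    have hl : PySem.List.pyGetD u (k : Int) 0 = s.getD k 0 := by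
      rw [PySem.List.pyGetD_natCast]
      exact getD_of_some (by rw [hget k hklt, if_neg (by omega)])
    have hr : PySem.List.pyGetD u ((s.length : Int) - 1 - (k : Int)) 0
        = s.getD (s.length - 1 - k) 0 := by
      rw [hjcast, PySem.List.pyGetD_natCast]
      exact getD_of_some (by rw [hget _ hjlt, if_neg (by omega)])
    have hstep : pvStep (s.length : Int) u (k : Int) =
        (u.set k (pvFlip (s.getD (s.length - 1 - k) 0))).set (s.length - 1 - k)
          (pvFlip (s.getD k 0)) := by
      show PySem.List.pySetD
          (PySem.List.pySetD u (k : Int)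
            (if PySem.List.pyGetD u ((s.length : Int) - 1 - (k : Int)) 0 ≠ 0 then 0 else 1))
          ((s.length : Int) - 1 - (k : Int))
          (if PySem.List.pyGetD u (k : Int) 0 ≠ 0 then 0 else 1) = _
      rw [hl, hr, hjcast, PySem.List.pySetD_natCast, PySem.List.pySetD_natCast]
      rfl
    rw [hstep]
    refine ⟨by simp [hlen], fun p hp => ?_⟩
    by_cases hpj : p = s.length - 1 - k
    · subst hpj
      rw [List.getElem?_set_self (by simp [hlen]; omega), if_pos (by omega)]
      have : s.length - 1 - (s.length - 1 - k) = k := by omega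
      rw [this]
    · rw [List.getElem?_set_ne (fun h => hpj h.symm)]
      by_cases hpk : p = k
      · subst hpk
        rw [List.getElem?_set_self (by omega), if_pos (by omega)]
      · rw [List.getElem?_set_ne (fun h => hpk h.symm), hget p hp]
        by_cases hc : p < k ∨ s.length - k ≤ p
        · rw [if_pos hc, if_pos (by omega)]
        · rw [if_neg hc, if_neg (by omega)]

-- B's value, element by element
lemma pvAlt_getElem? (s : List Int) (p : Nat) (hp : p < s.length) :
    (revFlip_alt s)[p]? = some (pvFlip (s.getD (s.length - 1 - p) 0)) := by
  unfold revFlip_alt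
  rw [List.getElem?_map, List.getElem?_reverse (by simpa using hp),
    List.getElem?_eq_getElem (by omega)]
  have : s.getD (s.length - 1 - p) 0 = s[s.length - 1 - p] := by
    simp [List.getD_eq_getElem?_getD, List.getElem?_eq_getElem (show s.length - 1 - p < s.length by omega)]
  simp only [pvFlip, this]
  simp

lemma pvAlt_length (s : List Int) : (revFlip_alt s).length = s.length := by
  simp [revFlip_alt]

-- ===== VERDICT (by name: the statement is the Claim_ definition above) =====
theorem revFlip_spec : Claim_equal_revFlip := by
  intro s _
  show revFlip s = revFlip_alt s
  set n := s.length with hn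
  show (if PySem.Int.mod (n : Int) 2 = 1 then
          PySem.List.pySetD
            ((PySem.List.pyRange 0 (PySem.Int.floordiv (n : Int) 2) 1).foldl (pvStep (n : Int)) s)
            (PySem.Int.floordiv (n : Int) 2)
            (if PySem.List.pyGetD
                ((PySem.List.pyRange 0 (PySem.Int.floordiv (n : Int) 2) 1).foldl (pvStep (n : Int)) s)
                (PySem.Int.floordiv (n : Int) 2) 0 ≠ 0 then 0 else 1)
        else (PySem.List.pyRange 0 (PySem.Int.floordiv (n : Int) 2) 1).foldl (pvStep (n : Int)) s)
      = revFlip_alt s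
  have hdiv : PySem.Int.floordiv (n : Int) 2 = ((n / 2 : Nat) : Int) :=
    PySem.Int.floordiv_natCast n 2
  have hmod : PySem.Int.mod (n : Int) 2 = ((n % 2 : Nat) : Int) :=
    PySem.Int.mod_natCast n 2
  have hm2 : 2 * (n / 2) ≤ n := by omega
  obtain ⟨hlen, hget⟩ := pvLoop_inv s (n / 2) hm2
  rw [hdiv, hmod]
  set u := ((PySem.List.pyRange 0 ((n / 2 : Nat) : Int) 1).foldl (pvStep (n : Int)) s) with hu
  by_cases hodd : n % 2 = 1
  · rw [if_pos (by exact_mod_cast congrArg (Nat.cast : Nat → Int) hodd)]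
    have hmlt : n / 2 < n := by omega
    have hmid : PySem.List.pyGetD u ((n / 2 : Nat) : Int) 0 = s.getD (n / 2) 0 := by
      rw [PySem.List.pyGetD_natCast]
      exact getD_of_some (by rw [hget _ hmlt, if_neg (by omega)])
    rw [hmid, PySem.List.pySetD_natCast]
    apply List.ext_getElem?
    intro p
    by_cases hp : p < n
    · by_cases hpm : p = n / 2
      · subst hpm
        rw [List.getElem?_set_self (by omega), pvAlt_getElem? s _ hp]
        have : n - 1 - n / 2 = n / 2 := by omega
        rw [this]
        simp [pvFlip]
      · rw [List.getElem?_set_ne (fun h => hpm h.symm), hget p hp, if_pos (by omega),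
            pvAlt_getElem? s p hp]
    · rw [List.getElem?_eq_none (by simp [hlen]; omega),
          List.getElem?_eq_none (by rw [pvAlt_length]; omega)]
  · rw [if_neg (by exact_mod_cast hodd)]
    apply List.ext_getElem?
    intro p
    by_cases hp : p < n
    · rw [hget p hp, if_pos (by omega), pvAlt_getElem? s p hp]
    · rw [List.getElem?_eq_none (by omega), List.getElem?_eq_none (by rw [pvAlt_length]; omega)]
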